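-- pv_equiv track=rewrite | github.com/AngeloSouza1/DesafiosOBC | projeto_cacador_tesouros/encontrar_tesouro.py | encontrar_caminho_ate_tesouro
-- ===== SOURCE A (Python) =====
-- def encontrar_caminho_ate_tesouro(mapa):
--     """
--     Encontra o caminho mais curto até o tesouro em um mapa de coordenadas.
--
--     Parâmetros:
--     - mapa (list): Lista de tuplas representando as coordenadas (x, y).
--
--     Retorna:
--     - list: Lista de tuplas com o caminho até o tesouro.
--     """
--     # Lista para armazenar o caminho percorrido
--     caminho = []
--
--     # Ponto de partida é a primeira coordenada
--     x_atual, y_atual = mapa[0]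
--     x_destino, y_destino = mapa[-1]
--
--     # Enquanto não chegarmos ao destino, vamos nos mover passo a passo
--     while (x_atual, y_atual) != (x_destino, y_destino):
--         caminho.append((x_atual, y_atual))
--
--         # Decidir o próximo passo em direção ao destino
--         if x_atual < x_destino:
--             x_atual += 1
--         elif x_atual > x_destino:
--             x_atual -= 1
--
--         if y_atual < y_destino:
--             y_atual += 1
--         elif y_atual > y_destino:
--             y_atual -= 1
--
--     # Adiciona a coordenada final (o destino)
--     caminho.append((x_destino, y_destino))
--
--     return caminho
-- ===== SOURCE B (Python) =====
-- def encontrar_caminho_ate_tesouro(mapa):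
--     x0, y0 = mapa[0]
--     xd, yd = mapa[-1]
--     dx = xd - x0
--     dy = yd - y0
--     sx = (dx > 0) - (dx < 0)
--     sy = (dy > 0) - (dy < 0)
--     n = max(abs(dx), abs(dy))
--     return [(x0 + sx * min(i, abs(dx)), y0 + sy * min(i, abs(dy)))
--             for i in range(n + 1)]
-- ===== Notes on version B (the rewrite author's own statement) =====
-- stated objective: alternative
-- what changed: Replaces the incremental while-loop with mutated current coordinates by a closed-form comprehension computing each path point directly from its index as (x0 + sx*min(i,|dx|), y0 + sy*min(i,|dy|)) for i in 0..max(|dx|,|dy|).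
import Mathlib
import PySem

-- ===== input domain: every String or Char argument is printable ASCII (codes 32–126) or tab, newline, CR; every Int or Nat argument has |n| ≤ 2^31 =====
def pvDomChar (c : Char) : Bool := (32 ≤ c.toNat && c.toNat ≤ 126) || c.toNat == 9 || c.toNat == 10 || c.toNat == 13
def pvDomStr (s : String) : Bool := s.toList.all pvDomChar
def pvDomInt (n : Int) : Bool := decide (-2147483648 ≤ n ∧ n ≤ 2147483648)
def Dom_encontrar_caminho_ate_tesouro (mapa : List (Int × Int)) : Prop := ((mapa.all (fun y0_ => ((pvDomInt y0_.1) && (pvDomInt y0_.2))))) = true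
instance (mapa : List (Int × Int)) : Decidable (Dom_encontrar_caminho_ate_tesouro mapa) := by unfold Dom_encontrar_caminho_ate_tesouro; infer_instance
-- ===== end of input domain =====

-- B replaces A's incremental while-loop by a closed form: point i is
-- (x0 + sx*min(i,|dx|), y0 + sy*min(i,|dy|)); same cost, different decomposition.

-- ===== PORT A =====
-- the while-loop of A: steps the current point towards the destination, appending as it goes.
-- fuel is only a totality guard: max(|dx|,|dy|) bounds the number of iterations exactly.
def pvLoopA (fuel : Nat) (x y xd yd : Int) (caminho : List (Int × Int)) : List (Int × Int) :=
  match fuel with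
  | 0 => caminho ++ [(xd, yd)]
  | fuel + 1 =>
    if (x, y) = (xd, yd) then
      caminho ++ [(xd, yd)]
    else
      let x' : Int := if x < xd then x + 1 else if x > xd then x - 1 else x
      let y' : Int := if y < yd then y + 1 else if y > yd then y - 1 else y
      pvLoopA fuel x' y' xd yd (caminho ++ [(x, y)])

def encontrar_caminho_ate_tesouro (mapa : List (Int × Int)) : List (Int × Int) :=
  match PySem.List.pyGet? mapa 0, PySem.List.pyGet? mapa (-1) with
  | some (x0, y0), some (xd, yd) => pvLoopA (max (xd - x0).natAbs (yd - y0).natAbs) x0 y0 xd yd []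
  | _, _ => []   -- mapa[0] raises IndexError: outside Pre_

-- ===== PORT B =====
def pvSgn (d : Int) : Int := if 0 < d then 1 else if d < 0 then -1 else 0   -- (d>0)-(d<0)

def encontrar_caminho_ate_tesouro_alt (mapa : List (Int × Int)) : List (Int × Int) :=
  match PySem.List.pyGet? mapa 0 with
  | none => []   -- mapa[0] raises IndexError: outside Pre_
  | some (x0, y0) =>
    match PySem.List.pyGet? mapa (-1) with
    | none => []
    | some (xd, yd) =>
      let dx := xd - x0
      let dy := yd - y0
      let n := max dx.natAbs dy.natAbs
      (List.range (n + 1)).map (fun (i : Nat) =>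
        (x0 + pvSgn dx * min (i : Int) (dx.natAbs : Int),
         y0 + pvSgn dy * min (i : Int) (dy.natAbs : Int)))

-- ===== PRECONDITION & SPEC =====
-- A raises IndexError on the empty map (mapa[0]); B raises there too, so Pre_ excludes it.
def Pre_encontrar_caminho_ate_tesouro (mapa : List (Int × Int)) : Prop := mapa ≠ []
instance (mapa : List (Int × Int)) : Decidable (Pre_encontrar_caminho_ate_tesouro mapa) := by unfold Pre_encontrar_caminho_ate_tesouro; infer_instance
def pvWitness_encontrar_caminho_ate_tesouro : (List (Int × Int)) := [(0, 0), (2, -1)]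
def Spec_encontrar_caminho_ate_tesouro (mapa : List (Int × Int)) (out : List (Int × Int)) : Prop := out = encontrar_caminho_ate_tesouro_alt mapa
instance (mapa : List (Int × Int)) (out : List (Int × Int)) : Decidable (Spec_encontrar_caminho_ate_tesouro mapa out) := by unfold Spec_encontrar_caminho_ate_tesouro; infer_instance

-- ===== CLAIM (what is proved, stated in full; the proofs are below) =====
def Claim_equal_encontrar_caminho_ate_tesouro : Prop := ∀ (mapa : List (Int × Int)), Dom_encontrar_caminho_ate_tesouro mapa → Pre_encontrar_caminho_ate_tesouro mapa → Spec_encontrar_caminho_ate_tesouro mapa (encontrar_caminho_ate_tesouro mapa)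

-- ===== LEMMAS AND PROOFS =====

-- one coordinate, one step of the loop: stepping then indexing by i equals indexing by i+1
theorem pv_step_coord (d : Int) (i : Nat) :
    pvSgn d * min ((i : Int) + 1) (d.natAbs : Int)
      = pvSgn d + pvSgn (d - pvSgn d) * min (i : Int) ((d - pvSgn d).natAbs : Int) := by
  unfold pvSgn
  split_ifs <;> omega

theorem pv_loopA_closed : ∀ (n : Nat) (x y xd yd : Int) (acc : List (Int × Int)),
    max (xd - x).natAbs (yd - y).natAbs = n →
    pvLoopA n x y xd yd acc
      = acc ++ (List.range (n + 1)).map (fun (i : Nat) =>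
          (x + pvSgn (xd - x) * min (i : Int) ((xd - x).natAbs : Int),
           y + pvSgn (yd - y) * min (i : Int) ((yd - y).natAbs : Int))) := by
  intro n
  induction n with
  | zero =>
      intro x y xd yd acc h
      have hx : x = xd := by omega
      have hy : y = yd := by omega
      subst hx; subst hy
      simp [pvLoopA, pvSgn]
  | succ n ih =>
      intro x y xd yd acc h
      have hne : ¬ ((x, y) = (xd, yd)) := by
        simp only [Prod.mk.injEq, not_and_or]
        omega
      rw [pvLoopA]
      rw [if_neg hne]
      have hx' : (if x < xd then x + 1 else if x > xd then x - 1 else x) = x + pvSgn (xd - x) := by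
        unfold pvSgn; split_ifs <;> omega
      have hy' : (if y < yd then y + 1 else if y > yd then y - 1 else y) = y + pvSgn (yd - y) := by
        unfold pvSgn; split_ifs <;> omega
      simp only [hx', hy']
      have hmax : max (xd - (x + pvSgn (xd - x))).natAbs (yd - (y + pvSgn (yd - y))).natAbs = n := by
        unfold pvSgn; split_ifs <;> omega
      rw [ih _ _ _ _ _ hmax]
      conv_rhs => rw [List.range_succ_eq_map]
      rw [List.map_cons, List.map_map]
      rw [List.append_assoc, List.singleton_append]
      congr 1
      congr 1
      · have h0 : min ((0:Nat):Int) ((xd - x).natAbs : Int) = 0 := by omega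
        have h0' : min ((0:Nat):Int) ((yd - y).natAbs : Int) = 0 := by omega
        rw [h0, h0']; simp
      congr 1
      funext i
      simp only [Function.comp]
      have e1 : xd - (x + pvSgn (xd - x)) = (xd - x) - pvSgn (xd - x) := by ring
      have e2 : yd - (y + pvSgn (yd - y)) = (yd - y) - pvSgn (yd - y) := by ring
      rw [e1, e2]
      have hc1 := pv_step_coord (xd - x) i
      have hc2 := pv_step_coord (yd - y) i
      rw [Prod.mk.injEq]
      push_cast at hc1 hc2 ⊢
      constructor <;> linarith [hc1, hc2]

-- ===== VERDICT (by name: the statement is the Claim_ definition above) =====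
theorem encontrar_caminho_ate_tesouro_spec : Claim_equal_encontrar_caminho_ate_tesouro := by
  intro mapa _ _
  unfold Spec_encontrar_caminho_ate_tesouro
  unfold encontrar_caminho_ate_tesouro encontrar_caminho_ate_tesouro_alt
  cases h0 : PySem.List.pyGet? mapa 0 with
  | none => rfl
  | some p =>
    cases h1 : PySem.List.pyGet? mapa (-1) with
    | none => rfl
    | some q =>
      obtain ⟨x0, y0⟩ := p
      obtain ⟨xd, yd⟩ := q
      simp only
      rw [pv_loopA_closed (max (xd - x0).natAbs (yd - y0).natAbs) x0 y0 xd yd [] rfl]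
      simp
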